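-- pv_equiv track=rewrite | github.com/pgorecki/testing101 | example1.py | more_negatives
-- ===== SOURCE A (Python) =====
-- def more_negatives(arr):
--     """
--     :param arr: array of numbers
--     :return: True if arr contains more negative numbers than positive
--     """
--     num_negative = 0
--     num_positive = 0
--     for number in arr:
--         if number < 0:
--             num_negative += 1
--         else:
--             num_positive += 1
--     return num_negative > num_positive
-- ===== SOURCE B (Python) =====
-- def more_negatives(arr):
--     s = sorted(arr)
--     if not s:
--         return False
--     return s[len(s) // 2] < 0
-- ===== Notes on version B (the rewrite author's own statement) =====
-- stated objective: alternative
-- what changed: B sorts the list and decides by the sign of the median element s[len(s)//2] (negatives form a majority iff the median is negative), replacing A's two-counter counting pass entirely.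
import Mathlib
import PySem

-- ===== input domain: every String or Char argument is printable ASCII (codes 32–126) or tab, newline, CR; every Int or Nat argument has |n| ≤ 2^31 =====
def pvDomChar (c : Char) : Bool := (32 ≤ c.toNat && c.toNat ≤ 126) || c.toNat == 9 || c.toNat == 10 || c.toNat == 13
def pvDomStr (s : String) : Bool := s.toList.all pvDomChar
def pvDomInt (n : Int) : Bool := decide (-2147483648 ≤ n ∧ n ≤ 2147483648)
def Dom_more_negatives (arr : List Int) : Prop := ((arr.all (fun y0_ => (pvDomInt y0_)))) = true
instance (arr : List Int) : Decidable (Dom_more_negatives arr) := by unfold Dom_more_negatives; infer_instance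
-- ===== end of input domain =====

-- B replaces A's two-counter counting pass with sort + median-sign test (order statistic); objective: alternative algorithm.

-- ===== PORT A =====
-- Port of A: fold over arr threading both counters, branch order as in Python.
def more_negatives (arr : List Int) : Bool :=
  let st := arr.foldl (fun (st : Int × Int) number =>
    if number < 0 then (st.1 + 1, st.2) else (st.1, st.2 + 1)) (0, 0)
  decide (st.1 > st.2)

-- ===== PORT B =====
-- Port of B: s = sorted(arr); if not s: False; else s[len(s)//2] < 0.
-- s[len(s)//2] ported as getD with default 0: exact, since the index is in range for nonempty s.
def more_negatives_alt (arr : List Int) : Bool :=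
  let s := PySem.List.sorted arr (fun x => x) false
  if s = [] then false
  else decide (s.getD (s.length / 2) 0 < 0)

-- ===== PRECONDITION & SPEC =====
def Spec_more_negatives (arr : List Int) (out : Bool) : Prop := out = more_negatives_alt arr
instance (arr : List Int) (out : Bool) : Decidable (Spec_more_negatives arr out) := by unfold Spec_more_negatives; infer_instance

-- ===== CLAIM (what is proved, stated in full; the proofs are below) =====
def Claim_equal_more_negatives : Prop := ∀ (arr : List Int), Dom_more_negatives arr → Spec_more_negatives arr (more_negatives arr)

-- ===== LEMMAS AND PROOFS =====

-- invariant: A's fold starting from (a,b) yields (a + #neg, b + (len - #neg))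
theorem more_negatives_fold (arr : List Int) (a b : Int) :
    arr.foldl (fun (st : Int × Int) number =>
      if number < 0 then (st.1 + 1, st.2) else (st.1, st.2 + 1)) (a, b)
    = (a + (arr.countP (fun x => decide (x < 0)) : Int),
       b + ((arr.length : Int) - (arr.countP (fun x => decide (x < 0)) : Int))) := by
  induction arr generalizing a b with
  | nil => simp
  | cons x xs ih =>
    by_cases hx : x < 0 <;> simp [List.foldl, hx, ih] <;> ring_nf

-- in a ≤-sorted list, negatives form a prefix of length countP (· < 0):
-- position i holds a negative iff i < countP.
theorem sorted_neg_prefix (s : List Int) (hs : s.Pairwise (· ≤ ·)) :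
    ∀ i, i < s.length → ((s.getD i 0 < 0) ↔ i < s.countP (fun x => decide (x < 0))) := by
  induction s with
  | nil => intro i hi; simp at hi
  | cons x xs ih =>
    rcases List.pairwise_cons.mp hs with ⟨hx, hxs⟩
    intro i hi
    by_cases h : x < 0
    · cases i with
      | zero => simp [h]
      | succ j =>
        have hj : j < xs.length := by simpa using hi
        rw [List.getD_cons_succ, ih hxs j hj]
        simp [h]
    · -- x ≥ 0, so every element of xs is ≥ 0 and countP xs = 0
      have hc : xs.countP (fun x => decide (x < 0)) = 0 := by
        rw [List.countP_eq_zero]; intro y hy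
        have := hx y hy; simp; omega
      cases i with
      | zero => simp [h, hc]
      | succ j =>
        have hj : j < xs.length := by simpa using hi
        rw [List.getD_cons_succ, ih hxs j hj, hc]
        simp [h, hc]

-- ===== VERDICT (by name: the statement is the Claim_ definition above) =====
theorem more_negatives_spec : Claim_equal_more_negatives := by
  intro arr _
  unfold Spec_more_negatives more_negatives more_negatives_alt
  rw [more_negatives_fold]
  set s := PySem.List.sorted arr (fun x => x) false with hsdef
  have hperm : s.Perm arr := PySem.List.sorted_perm arr _ _
  have hcount : s.countP (fun x => decide (x < 0)) = arr.countP (fun x => decide (x < 0)) :=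
    hperm.countP_eq _
  have hlen : s.length = arr.length := hperm.length_eq
  by_cases hnil : s = []
  · have h0 : s.length = 0 := by rw [hnil]; rfl
    rw [hlen] at h0
    have harr : arr = [] := List.length_eq_zero_iff.mp h0
    subst harr
    simp [hnil]
  · have hpw : s.Pairwise (· ≤ ·) := by
      have := PySem.List.sorted_pairwise (xs := arr) (key := fun x : Int => x)
      simpa [hsdef] using this
    have hlt : s.length / 2 < s.length := by
      have : 0 < s.length := List.length_pos_iff.mpr hnil
      omega
    have hmed := sorted_neg_prefix s hpw (s.length / 2) hlt
    simp only [hnil, if_false, decide_eq_decide]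
    rw [hmed, hcount, hlen]
    omega
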